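-- pv_equiv track=rewrite | github.com/zugmana/xnat-access | downloadtools/organizer.py | simplifystring
-- ===== SOURCE A (Python) =====
-- def simplifystring(S):
--     special_chars = [" ", "-", ".", "+", "(", ")", "/",":","!","#",
--                      "$","%","^","&","*","'","`"]
--     for c in special_chars:
--         S = S.replace(c, "")
--     while '--' in S:
--         S = S.replace("--","")
--     S = S.upper()
--     return S
-- ===== SOURCE B (Python) =====
-- _FORBIDDEN = frozenset(" -.+()/:!#$%^&*'`")
--
--
-- def simplifystring(S):
--     # one pass over S: keep characters outside the forbidden set, then uppercase
--     return "".join(c for c in S if c not in _FORBIDDEN).upper()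
-- ===== Notes on version B (the rewrite author's own statement) =====
-- stated objective: simpler
-- what changed: A makes 17 whole-string replace passes (one per special character) plus a dead while-loop stripping '--'; B builds a frozenset of the special characters once and makes a single filtering pass over S, then uppercases.
import Mathlib
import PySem

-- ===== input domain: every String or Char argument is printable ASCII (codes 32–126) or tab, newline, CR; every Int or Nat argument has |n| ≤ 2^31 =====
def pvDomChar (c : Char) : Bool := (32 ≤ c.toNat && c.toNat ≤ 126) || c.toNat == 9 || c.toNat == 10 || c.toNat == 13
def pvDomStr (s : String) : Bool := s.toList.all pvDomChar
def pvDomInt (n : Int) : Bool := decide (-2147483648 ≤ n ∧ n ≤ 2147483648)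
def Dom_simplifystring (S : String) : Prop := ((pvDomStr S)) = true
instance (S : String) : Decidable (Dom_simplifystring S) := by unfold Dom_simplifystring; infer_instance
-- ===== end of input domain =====

-- B replaces A's 17 whole-string replace passes (plus a dead '--' while-loop) by one
-- filtering pass over S driven by a set of forbidden characters, then uppercases: simpler.


-- ===== PORT A =====
-- the `while '--' in S: S = S.replace('--','')` loop; fuel = current length is enough,
-- since every executed replace of an occurring '--' removes at least two characters
def simplifyWhile : Nat → String → String
  | 0, s => s
  | fuel + 1, s =>
    if PySem.Str.isIn "--" s then simplifyWhile fuel (PySem.Str.replace s "--" "") else s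

def simplifystring (S : String) : String :=
  let specialChars : List String :=
    [" ", "-", ".", "+", "(", ")", "/", ":", "!", "#", "$", "%", "^", "&", "*", "'", "`"]
  let s1 := specialChars.foldl (fun s c => PySem.Str.replace s c "") S
  let s2 := simplifyWhile s1.toList.length s1
  PySem.Str.upper s2

-- ===== PORT B =====
def pvForbidden : PySem.Set Char :=
  PySem.Set.ofList [' ', '-', '.', '+', '(', ')', '/', ':', '!', '#', '$', '%', '^', '&', '*', '\'', '`']

def simplifystring_alt (S : String) : String :=
  PySem.Str.upper (String.ofList (S.toList.filter (fun c => !pvForbidden.contains c)))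

-- ===== PRECONDITION & SPEC =====
def Spec_simplifystring (S : String) (out : String) : Prop := out = simplifystring_alt S
instance (S : String) (out : String) : Decidable (Spec_simplifystring S out) := by unfold Spec_simplifystring; infer_instance

-- ===== CLAIM (what is proved, stated in full; the proofs are below) =====
def Claim_equal_simplifystring : Prop := ∀ (S : String), Dom_simplifystring S → Spec_simplifystring S (simplifystring S)

-- ===== LEMMAS AND PROOFS =====

-- replace.go with a single-character pattern and empty replacement filters that character out
theorem go_single (c : Char) : ∀ (fuel : Nat) (l acc : List Char), l.length ≤ fuel →
    PySem.Chars.replace.go [c] [] fuel l acc = acc.reverse ++ l.filter (fun x => x != c) := by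
  intro fuel
  induction fuel with
  | zero =>
    intro l acc h
    have : l = [] := List.length_eq_zero_iff.mp (Nat.le_zero.mp h)
    subst this; simp [PySem.Chars.replace.go]
  | succ n ih =>
    intro l acc h
    match l with
    | [] => simp [PySem.Chars.replace.go]
    | x :: t =>
      simp only [PySem.Chars.replace.go]
      by_cases hx : x = c
      · subst hx
        simp [List.isPrefixOf, ih t acc (by simpa using h)]
      · simp [List.isPrefixOf, Ne.symm hx, hx, ih t (x :: acc) (by simpa using h)]

theorem replace_single (s : List Char) (c : Char) :
    PySem.Chars.replace s [c] [] = s.filter (fun x => x != c) := by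
  simp [PySem.Chars.replace, go_single c s.length s [] le_rfl]

-- a chain of single-character replace passes equals one filtering pass
theorem foldl_replace_chars (cs : List Char) : ∀ (S : String),
    ((cs.map (fun c => String.ofList [c])).foldl (fun s c => PySem.Str.replace s c "") S).toList
    = S.toList.filter (fun x => !cs.contains x) := by
  induction cs with
  | nil => intro S; simp
  | cons c t ih =>
    intro S
    simp only [List.map_cons, List.foldl_cons, ih]
    have hstep : (PySem.Str.replace S (String.ofList [c]) "").toList
        = S.toList.filter (fun x => x != c) := by
      rw [PySem.Str.toList_replace]
      simpa using replace_single S.toList c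
    rw [hstep, List.filter_filter]
    apply List.filter_congr
    intro x _
    rw [Bool.eq_iff_iff]
    simp [and_comm]

-- membership in the forbidden set is membership in the literal character list
theorem pvForbidden_contains (x : Char) :
    pvForbidden.contains x
    = [' ', '-', '.', '+', '(', ')', '/', ':', '!', '#', '$', '%', '^', '&', '*', '\'', '`'].contains x := by
  rw [Bool.eq_iff_iff]
  simp only [pvForbidden, PySem.Set.contains, List.contains_iff_mem, PySem.Set.mem_ofList]

-- the seventeen sequential whole-string replace passes of A equal B's one filtering pass
theorem foldl_replace_eq_filter (S : String) :
    ([" ", "-", ".", "+", "(", ")", "/", ":", "!", "#", "$", "%", "^", "&", "*", "'", "`"].foldl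
      (fun s c => PySem.Str.replace s c "") S).toList
    = S.toList.filter (fun c => !pvForbidden.contains c) := by
  rw [show ([" ", "-", ".", "+", "(", ")", "/", ":", "!", "#", "$", "%", "^", "&", "*", "'", "`"] : List String)
      = ([' ', '-', '.', '+', '(', ')', '/', ':', '!', '#', '$', '%', '^', '&', '*', '\'', '`'].map
          (fun c => String.ofList [c])) from rfl,
    foldl_replace_chars]
  apply List.filter_congr
  intro x _
  rw [pvForbidden_contains]

-- after the filter pass no '-' remains, so the while-loop condition is false at once
theorem simplifyWhile_of_no_dash (fuel : Nat) (s : String) (h : '-' ∉ s.toList) :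
    simplifyWhile fuel s = s := by
  cases fuel with
  | zero => rfl
  | succ n =>
    have hin : PySem.Str.isIn "--" s = false := by
      rw [PySem.Str.isIn_eq]
      apply (PySem.Chars.isIn_eq_false_iff _ _).mpr
      intro hinf
      exact h (hinf.subset (by simp [show ("--" : String).toList = ['-','-'] from rfl]))
    simp only [simplifyWhile, hin, Bool.false_eq_true, if_false]

-- ===== VERDICT (by name: the statement is the Claim_ definition above) =====
theorem simplifystring_spec : Claim_equal_simplifystring := by
  intro S _
  unfold Spec_simplifystring
  show PySem.Str.upper (simplifyWhile _ _) = simplifystring_alt S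
  have hfold := foldl_replace_eq_filter S
  have hnd : '-' ∉ ([" ", "-", ".", "+", "(", ")", "/", ":", "!", "#", "$", "%", "^", "&", "*", "'", "`"].foldl
      (fun s c => PySem.Str.replace s c "") S).toList := by
    rw [hfold]
    intro hm
    have h1 := List.of_mem_filter hm
    rw [show pvForbidden.contains '-' = true from by decide] at h1
    simp at h1
  rw [simplifyWhile_of_no_dash _ _ hnd]
  unfold simplifystring_alt
  exact congrArg PySem.Str.upper (String.toList_inj.mp (by rw [hfold, String.toList_ofList]))
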